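-- pv_equiv track=rewrite | github.com/powera/greenland | src/wordfreq/data/compare.py | create_rank_dictionary
-- ===== SOURCE A (Python) =====
-- from typing import Dict, List, Tuple, Set, Any
--
-- def create_rank_dictionary(frequency_dict: Dict[str, int]) -> Dict[str, int]:
--     """Convert frequency dictionary to rank dictionary.
--
--     Words are ranked by frequency (highest frequency = rank 1).
--     Words with the same frequency get the same rank.
--     """
--     # Sort words by frequency in descending order
--     sorted_items = sorted(frequency_dict.items(), key=lambda x: x[1], reverse=True)
--
--     # Create a dictionary mapping words to their ranks
--     rank_dict = {}
--     current_rank = 1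
--     prev_freq = None
--
--     for i, (word, freq) in enumerate(sorted_items):
--         # If this frequency is different from the previous one, update the rank
--         if freq != prev_freq:
--             current_rank = i + 1
--
--         rank_dict[word] = current_rank
--         prev_freq = freq
--
--     return rank_dict
-- ===== SOURCE B (Python) =====
-- def create_rank_dictionary(frequency_dict):
--     """Convert frequency dictionary to rank dictionary via a freq->rank table.
--
--     Tally how many words share each frequency, walk the distinct frequencies
--     in descending order keeping a running count of words already ranked to
--     build a frequency->rank table, then map every sorted item through it.
--     """
--     sorted_items = sorted(frequency_dict.items(), key=lambda x: x[1], reverse=True)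
--     counts = {}
--     for f in (f for _, f in frequency_dict.items()):
--         counts[f] = counts.get(f, 0) + 1
--     rank_of = {}
--     seen = 0
--     for f in sorted(counts, reverse=True):
--         rank_of[f] = seen + 1
--         seen += counts[f]
--     return {w: rank_of[f] for w, f in sorted_items}
-- ===== Notes on version B (the rewrite author's own statement) =====
-- stated objective: alternative
-- what changed: A assigns ranks in one positional sweep over the sorted items using the enumerate index and a previous-frequency register; B instead tallies how many words share each frequency, builds a frequency->rank table by walking the distinct frequencies in descending order with a running count, and then maps each sorted item through that table.
import Mathlib
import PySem

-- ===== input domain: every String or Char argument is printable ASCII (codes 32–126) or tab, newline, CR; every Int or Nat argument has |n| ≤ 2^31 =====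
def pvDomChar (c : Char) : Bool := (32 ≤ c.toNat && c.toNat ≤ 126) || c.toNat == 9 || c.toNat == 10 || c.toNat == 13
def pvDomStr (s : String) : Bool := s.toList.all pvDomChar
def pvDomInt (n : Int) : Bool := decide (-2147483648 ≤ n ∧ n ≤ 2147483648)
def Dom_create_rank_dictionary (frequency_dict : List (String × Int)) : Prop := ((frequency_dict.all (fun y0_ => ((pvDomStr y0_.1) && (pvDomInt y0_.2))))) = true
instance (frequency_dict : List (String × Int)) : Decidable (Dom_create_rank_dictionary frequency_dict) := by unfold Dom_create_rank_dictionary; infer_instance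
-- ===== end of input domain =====

-- B replaces A's positional sweep (enumerate index + previous-frequency state) by a
-- frequency->rank table built from a tally of words per frequency; objective: alternative decomposition.

-- ===== PORT A =====
-- A's loop body: state is (rank_dict, current_rank, prev_freq); item is (i, (word, freq))
def pvAStep (st : PySem.Dict String Int × Int × Option Int) (iwf : Int × (String × Int)) :
    PySem.Dict String Int × Int × Option Int :=
  let current_rank := if some iwf.2.2 ≠ st.2.2 then iwf.1 + 1 else st.2.1
  (st.1.insert iwf.2.1 current_rank, current_rank, some iwf.2.2)

def create_rank_dictionary (frequency_dict : List (String × Int)) : List (String × Int) :=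
  let sorted_items := PySem.List.sorted frequency_dict (fun x => x.2) true
  (((PySem.List.enumerate sorted_items).foldl pvAStep (PySem.Dict.empty, 1, none)).1).items

-- ===== PORT B =====
-- B's table-building loop body: state is (rank_of, seen); `counts` is the tally of words per frequency
def pvBRankStep (counts : PySem.Dict Int Int) (st : PySem.Dict Int Int × Int) (f : Int) :
    PySem.Dict Int Int × Int :=
  (st.1.insert f (st.2 + 1), st.2 + counts.getD f 0)

def create_rank_dictionary_alt (frequency_dict : List (String × Int)) : List (String × Int) :=
  let sorted_items := PySem.List.sorted frequency_dict (fun x => x.2) true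
  let counts := PySem.Dict.counter (frequency_dict.map (fun p => p.2))
  let rank_of := ((PySem.List.sorted counts.keys (fun f => f) true).foldl
      (pvBRankStep counts) (PySem.Dict.empty, 0)).1
  -- Python's rank_of[f] never raises (every frequency of sorted_items is a key of rank_of),
  -- so getD with any default is exact here
  (sorted_items.foldl (fun d p => d.insert p.1 (rank_of.getD p.2 0)) PySem.Dict.empty).items

-- ===== PRECONDITION & SPEC =====
def Spec_create_rank_dictionary (frequency_dict : List (String × Int)) (out : List (String × Int)) : Prop := out = create_rank_dictionary_alt frequency_dict
instance (frequency_dict : List (String × Int)) (out : List (String × Int)) : Decidable (Spec_create_rank_dictionary frequency_dict out) := by unfold Spec_create_rank_dictionary; infer_instance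

-- ===== CLAIM (what is proved, stated in full; the proofs are below) =====
def Claim_equal_create_rank_dictionary : Prop := ∀ (frequency_dict : List (String × Int)), Dom_create_rank_dictionary frequency_dict → Spec_create_rank_dictionary frequency_dict (create_rank_dictionary frequency_dict)

-- ===== LEMMAS AND PROOFS =====

-- the competition rank of frequency f among the items of s: 1 + #items strictly more frequent
def pvRank (s : List (String × Int)) (f : Int) : Int :=
  1 + (s.countP (fun q => decide (f < q.2)) : Int)

-- A's sweep over the descending-sorted list inserts exactly pvRank of each item's frequency;
-- u is the processed prefix, t the rest, (cr, pf) the carried (current_rank, prev_freq)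
theorem pvA_fold_eq (s : List (String × Int)) :
    ∀ (t u : List (String × Int)) (d : PySem.Dict String Int) (cr : Int) (pf : Option Int)
      (k : Int),
      u ++ t = s →
      k = (u.length : Int) →
      (∀ a ∈ u, ∀ b ∈ t, b.2 ≤ a.2) →
      t.Pairwise (fun a b => b.2 ≤ a.2) →
      (∀ g, pf = some g → (∀ a ∈ u, g ≤ a.2) ∧ (∀ b ∈ t, b.2 ≤ g) ∧ cr = pvRank s g) →
      (pf = none → u = []) →
      ((PySem.List.enumerate t k).foldl pvAStep (d, cr, pf)).1
        = t.foldl (fun d p => d.insert p.1 (pvRank s p.2)) d := by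
  intro t
  induction t with
  | nil => intro u d cr pf k _ _ _ _ _ _; rfl
  | cons p t' ih =>
    intro u d cr pf k hs hk hut hp hpf hnone
    rcases List.pairwise_cons.mp hp with ⟨hpt', hp'⟩
    rw [PySem.List.enumerate_cons, List.foldl_cons, List.foldl_cons]
    have hrank : (if some p.2 ≠ pf then k + 1 else cr) = pvRank s p.2 := by
      by_cases hc : some p.2 = pf
      · rcases hpf p.2 hc.symm with ⟨_, _, hcr⟩
        simp [hc, hcr.symm]
      · rw [if_pos hc]
        have hu_gt : ∀ a ∈ u, p.2 < a.2 := by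
          intro a ha
          cases hpfc : pf with
          | none => exact absurd (hnone hpfc ▸ ha) (List.not_mem_nil)
          | some g =>
            rcases hpf g hpfc with ⟨hga, hbg, _⟩
            have h1 : p.2 ≤ g := hbg p (List.mem_cons_self)
            have h2 : g ≠ p.2 := fun h => hc (by rw [hpfc, h])
            exact lt_of_lt_of_le (lt_of_le_of_ne h1 (fun h => h2 h.symm)) (hga a ha)
        have hcount : s.countP (fun q => decide (p.2 < q.2)) = u.length := by
          rw [← hs, List.countP_append]
          have hcu : u.countP (fun q => decide (p.2 < q.2)) = u.length :=
            List.countP_eq_length.mpr (fun a ha => by simpa using hu_gt a ha)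
          have hct : (p :: t').countP (fun q => decide (p.2 < q.2)) = 0 :=
            List.countP_eq_zero.mpr (by
              intro a ha
              rcases List.mem_cons.mp ha with rfl | ha'
              · simp
              · simpa using not_lt.mpr (hpt' a ha'))
          rw [hcu, hct]; omega
        rw [pvRank, hcount, hk]; ring
    show ((PySem.List.enumerate t' (k+1)).foldl pvAStep
        (d.insert p.1 (if some p.2 ≠ pf then k + 1 else cr),
         (if some p.2 ≠ pf then k + 1 else cr), some p.2)).1 = _
    rw [hrank]
    refine ih (u ++ [p]) _ _ _ _ (by simpa using hs) (by simp [hk]) ?_ hp' ?_ (by simp)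
    · intro a ha b hb
      rcases List.mem_append.mp ha with ha' | ha'
      · exact hut a ha' b (List.mem_cons_of_mem _ hb)
      · rw [List.mem_singleton.mp ha']; exact hpt' b hb
    · intro g hg
      injection hg with hg; subst hg
      refine ⟨?_, hpt', rfl⟩
      intro a ha
      rcases List.mem_append.mp ha with ha' | ha'
      · exact hut a ha' p (List.mem_cons_self)
      · rw [List.mem_singleton.mp ha']

-- inserting only at keys other than f leaves getD f unchanged
theorem pvB_fold_notmem (counts : PySem.Dict Int Int) (f : Int) :
    ∀ (r : List Int) (d : PySem.Dict Int Int) (n : Int), f ∉ r →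
      ((r.foldl (pvBRankStep counts) (d, n)).1).getD f 0 = d.getD f 0 := by
  intro r
  induction r with
  | nil => intro d n _; rfl
  | cons g r' ih =>
    intro d n hnm
    simp only [List.mem_cons, not_or] at hnm
    simp only [List.foldl_cons, pvBRankStep]
    rw [ih _ _ (hnm.2), PySem.Dict.getD_insert_of_ne _ _ _ hnm.1]

-- B's table loop: for f in the strictly descending list r, the table entry is
-- n + 1 + the counts-weighted number of entries of r greater than f
theorem pvB_fold_eq (counts : PySem.Dict Int Int) :
    ∀ (r : List Int) (d : PySem.Dict Int Int) (n : Int),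
      r.Pairwise (fun a b => b < a) →
      ∀ f ∈ r, ((r.foldl (pvBRankStep counts) (d, n)).1).getD f 0
        = n + 1 + ((r.filter (fun g => decide (f < g))).map (fun g => counts.getD g 0)).sum := by
  intro r
  induction r with
  | nil => intro d n _ f hf; simp at hf
  | cons g r' ih =>
    intro d n hp f hf
    rcases List.pairwise_cons.mp hp with ⟨hg, hp'⟩
    simp only [List.foldl_cons, pvBRankStep]
    rcases List.mem_cons.mp hf with rfl | hf'
    · have hnm : f ∉ r' := fun h => lt_irrefl f (hg f h)
      rw [pvB_fold_notmem counts f r' _ _ hnm, PySem.Dict.getD_insert_self]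
      have h2 : r'.filter (fun g => decide (f < g)) = [] := by
        rw [List.filter_eq_nil_iff]; intro a ha; simpa using not_lt.mpr (le_of_lt (hg a ha))
      simp [h2]
    · have hlt : f < g := hg f hf'
      rw [ih _ _ hp' f hf']
      have h1 : (decide (f < g)) = true := by simpa using hlt
      simp only [List.filter_cons, h1, if_pos, List.map_cons, List.sum_cons]
      ring

-- B's rank_of table agrees with pvRank on every frequency occurring in the input
theorem pvB_table_eq (fd : List (String × Int)) (f : Int)
    (hf : f ∈ fd.map (fun p => p.2)) :
    (((PySem.List.sorted (PySem.Dict.counter (fd.map (fun p => p.2))).keys (fun f => f) true).foldl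
        (pvBRankStep (PySem.Dict.counter (fd.map (fun p => p.2)))) (PySem.Dict.empty, 0)).1).getD f 0
      = pvRank (PySem.List.sorted fd (fun x => x.2) true) f := by
  set vals := fd.map (fun p => p.2) with hvals
  set counts := PySem.Dict.counter vals with hcounts
  set ds := PySem.List.sorted counts.keys (fun f => f) true with hds
  have hperm : ds.Perm (PySem.Set.ofList vals) := by
    rw [hds, hcounts, PySem.Dict.keys_counter]
    exact PySem.List.sorted_perm _ _ _
  have hnd : ds.Nodup := hperm.nodup_iff.mpr (PySem.Set.nodup_ofList vals)
  have hmem : ∀ x, x ∈ ds ↔ x ∈ vals := by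
    intro x
    rw [hperm.mem_iff, PySem.Set.mem_ofList]
  have hle : ds.Pairwise (fun a b => b ≤ a) := PySem.List.sorted_pairwise_rev _ _
  have hlt : ds.Pairwise (fun a b => b < a) := by
    have := hle.and (List.Pairwise.imp (fun h => h) hnd)
    exact this.imp (fun ⟨h1, h2⟩ => lt_of_le_of_ne h1 (Ne.symm h2))
  have hfds : f ∈ ds := (hmem f).mpr hf
  rw [pvB_fold_eq counts ds _ _ hlt f hfds]
  have hmap : (ds.filter (fun g => decide (f < g))).map (fun g => counts.getD g 0)
      = ((ds.filter (fun g => decide (f < g))).map (fun g => List.count g vals)).map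
          (fun n : Nat => (n : Int)) := by
    rw [List.map_map]
    exact List.map_congr_left (fun g _ => by
      rw [hcounts, PySem.Dict.getD_counter]; rfl)
  rw [hmap]
  have hpermf : (ds.filter (fun g => decide (f < g))).Perm
      (vals.dedup.filter (fun g => decide (f < g))) := by
    refine List.Perm.filter _ ?_
    rw [List.perm_ext_iff_of_nodup hnd vals.nodup_dedup]
    intro x
    rw [hmem x, List.mem_dedup]
  have hsum : ((ds.filter (fun g => decide (f < g))).map (fun g => List.count g vals)).sum
      = vals.countP (fun g => decide (f < g)) := by
    rw [List.Perm.sum_eq (hpermf.map _)]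
    exact List.sum_map_count_dedup_filter_eq_countP _ vals
  rw [← Nat.cast_list_sum, hsum]
  have hcp : (PySem.List.sorted fd (fun x => x.2) true).countP (fun q => decide (f < q.2))
      = vals.countP (fun g => decide (f < g)) := by
    rw [List.Perm.countP_eq _ (PySem.List.sorted_perm fd (fun x => x.2) true), hvals,
      List.countP_map]
    rfl
  rw [pvRank, hcp]
  ring

-- both programs build the dict by inserting, along the same sorted list, the pvRank of each frequency
theorem crd_eq (fd : List (String × Int)) :
    create_rank_dictionary fd = create_rank_dictionary_alt fd := by
  show (((PySem.List.enumerate (PySem.List.sorted fd (fun x => x.2) true)).foldl pvAStep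
      (PySem.Dict.empty, 1, none)).1).items
    = ((PySem.List.sorted fd (fun x => x.2) true).foldl
        (fun d p => d.insert p.1
          ((((PySem.List.sorted (PySem.Dict.counter (fd.map (fun p => p.2))).keys (fun f => f)
              true).foldl (pvBRankStep (PySem.Dict.counter (fd.map (fun p => p.2))))
              (PySem.Dict.empty, 0)).1).getD p.2 0)) PySem.Dict.empty).items
  have hA := pvA_fold_eq (PySem.List.sorted fd (fun x => x.2) true)
    (PySem.List.sorted fd (fun x => x.2) true) [] PySem.Dict.empty 1 none 0
    rfl (by simp) (by simp) (PySem.List.sorted_pairwise_rev fd (fun x => x.2))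
    (by intro g h; cases h) (fun _ => rfl)
  rw [hA]
  congr 1
  refine PySem.List.foldl_congr_mem _ _ _ _ ?_
  intro acc p hp
  rw [pvB_table_eq fd p.2 ?_]
  exact List.mem_map_of_mem ((PySem.List.mem_sorted fd (fun x => x.2) true p).mp hp)

-- ===== VERDICT (by name: the statement is the Claim_ definition above) =====
theorem create_rank_dictionary_spec : Claim_equal_create_rank_dictionary := by
  intro fd _
  exact crd_eq fd
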